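-- pv_equiv track=rewrite | github.com/tweeklab/wand | esp32/main/encode_ui_html.py | format_hex
-- ===== SOURCE A (Python) =====
-- def format_hex(data, basename):
--     ret = ""
--     BYTES_PER_LINE=15
--     ret += f'const char {basename}[] = {{\n'
--     (whole_lines, final_line_size) = divmod(len(data), BYTES_PER_LINE)
--     for i in range(whole_lines):
--         if final_line_size == 0 and i == whole_lines - 1:
--             endchar = '\n};'
--         else:
--             endchar=','
--         ret += (' ' * 4) + ', '.join([f"0x{b:02x}" for b in data[i*BYTES_PER_LINE:(i*BYTES_PER_LINE)+BYTES_PER_LINE]]) + f'{endchar}\n'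
--     if final_line_size > 0:
--         ret += (' ' * 4) + ', '.join([f"0x{b:02x}" for b in data[whole_lines*BYTES_PER_LINE:]]) + '\n};\n'
--     ret += f"const ssize_t {basename}_len = {len(data)};\n\n"
--
--     return ret
-- ===== SOURCE B (Python) =====
-- def format_hex(data, basename):
--     # streaming emitter: one pass over the bytes, separator chosen by position
--     out = f'const char {basename}[] = {{\n'
--     for i, b in enumerate(data):
--         out += '    ' if i == 0 else (',\n    ' if i % 15 == 0 else ', ')
--         out += f'0x{b:02x}'
--     if data:
--         out += '\n};\n'
--     out += f'const ssize_t {basename}_len = {len(data)};\n\n'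
--     return out
-- ===== Notes on version B (the rewrite author's own statement) =====
-- stated objective: alternative
-- what changed: Replaces A's divmod line chunking (whole-lines loop over slices with a per-line join and a special endchar for the last full line, plus a trailing-partial-line branch) with a single per-byte streaming pass that emits a position-dependent separator before each byte (' ' at the start, ',\n ' at a line boundary, ', ' otherwise) and closes the array once at the end; no slicing or joining at all.
import Mathlib
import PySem

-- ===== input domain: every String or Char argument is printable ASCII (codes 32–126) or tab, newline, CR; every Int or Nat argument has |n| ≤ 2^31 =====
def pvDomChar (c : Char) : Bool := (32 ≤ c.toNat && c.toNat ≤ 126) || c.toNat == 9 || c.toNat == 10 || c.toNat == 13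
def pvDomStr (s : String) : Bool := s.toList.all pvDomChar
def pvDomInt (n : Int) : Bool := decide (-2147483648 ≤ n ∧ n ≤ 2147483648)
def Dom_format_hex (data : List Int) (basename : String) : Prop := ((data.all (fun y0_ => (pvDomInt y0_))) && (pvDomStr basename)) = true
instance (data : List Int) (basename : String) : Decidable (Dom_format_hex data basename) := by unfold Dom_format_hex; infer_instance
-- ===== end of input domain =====

-- B replaces A's divmod line chunking by a single per-byte streaming pass emitting a position-dependent separator (objective: alternative, same cost); same return value, no side effects.

-- shared helper: exact port of the f-string piece f"0x{b:02x}"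
-- (lowercase hex digits of |b|, '-' sign in front, zero-padded to total width 2 — exact for every Int)
def pyHex02 (b : Int) : String :=
  "0x" ++ PySem.Str.zfill (String.ofList ((if b < 0 then ['-'] else []) ++ Nat.toDigits 16 b.natAbs)) 2

-- ===== PORT A =====
def format_hex (data : List Int) (basename : String) : String :=
  let ret : String := ""
  let ret := ret ++ ("const char " ++ basename ++ "[] = {\n")
  let whole_lines : Int := PySem.Int.floordiv (data.length : Int) 15
  let final_line_size : Int := PySem.Int.mod (data.length : Int) 15
  let ret := (PySem.List.pyRange 0 whole_lines 1).foldl (fun ret i =>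
      let endchar : String := if final_line_size = 0 ∧ i = whole_lines - 1 then "\n};" else ","
      ret ++ ("    " ++ PySem.Str.join ", "
        ((PySem.List.slice data (some (i * 15)) (some (i * 15 + 15))).map pyHex02) ++ (endchar ++ "\n"))) ret
  let ret := if final_line_size > 0 then
      ret ++ ("    " ++ PySem.Str.join ", "
        ((PySem.List.slice data (some (whole_lines * 15)) none).map pyHex02) ++ "\n};\n")
    else ret
  ret ++ ("const ssize_t " ++ basename ++ "_len = " ++ PySem.Int.toStr (data.length : Int) ++ ";\n\n")

-- ===== PORT B =====
def format_hex_alt (data : List Int) (basename : String) : String :=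
  let out : String := "const char " ++ basename ++ "[] = {\n"
  let out := (PySem.List.enumerate data).foldl (fun out p =>
      out ++ (if p.1 = 0 then "    " else if PySem.Int.mod p.1 15 = 0 then ",\n    " else ", ")
          ++ pyHex02 p.2) out
  let out := if data ≠ [] then out ++ "\n};\n" else out
  out ++ ("const ssize_t " ++ basename ++ "_len = " ++ PySem.Int.toStr (data.length : Int) ++ ";\n\n")

-- ===== PRECONDITION & SPEC =====
def Spec_format_hex (data : List Int) (basename : String) (out : String) : Prop := out = format_hex_alt data basename
instance (data : List Int) (basename : String) (out : String) : Decidable (Spec_format_hex data basename out) := by unfold Spec_format_hex; infer_instance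

-- ===== CLAIM (what is proved, stated in full; the proofs are below) =====
def Claim_equal_format_hex : Prop := ∀ (data : List Int) (basename : String), Dom_format_hex data basename → Spec_format_hex data basename (format_hex data basename)

-- ===== LEMMAS AND PROOFS =====

-- A's body fold together with its trailing partial-line append, isolated from header/footer
def aBody (data : List Int) : String :=
  ((PySem.List.pyRange 0 (PySem.Int.floordiv (data.length : Int) 15) 1).foldl (fun ret i =>
      let endchar : String := if PySem.Int.mod (data.length : Int) 15 = 0 ∧ i = PySem.Int.floordiv (data.length : Int) 15 - 1 then "\n};" else ","
      ret ++ ("    " ++ PySem.Str.join ", "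
        ((PySem.List.slice data (some (i * 15)) (some (i * 15 + 15))).map pyHex02) ++ (endchar ++ "\n"))) "")
  ++ (if PySem.Int.mod (data.length : Int) 15 > 0 then
      "    " ++ PySem.Str.join ", "
        ((PySem.List.slice data (some (PySem.Int.floordiv (data.length : Int) 15 * 15)) none).map pyHex02) ++ "\n};\n"
    else "")

-- proof-side: the lines phrased as structural recursion on chunks of 15
def chunkLines (rest : List Int) : List String :=
  if h : rest = [] then []
  else ("    " ++ PySem.Str.join ", " ((rest.take 15).map pyHex02)) :: chunkLines (rest.drop 15)
termination_by rest.length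
decreasing_by
  have : rest.length ≠ 0 := fun hn => h (List.eq_nil_of_length_eq_zero hn)
  simp only [List.length_drop]; omega

def bBody (data : List Int) : String :=
  if chunkLines data = [] then "" else PySem.Str.join ",\n" (chunkLines data) ++ "\n};\n"

-- B's per-byte emitter, phrased structurally with an explicit running index
def efB (i : Int) : List Int → String
  | [] => ""
  | b :: t => (if i = 0 then "    " else if PySem.Int.mod i 15 = 0 then ",\n    " else ", ")
      ++ pyHex02 b ++ efB (i + 1) t

-- the within-chunk ", "-separated tail
def csep : List Int → String
  | [] => ""
  | b :: t => ", " ++ pyHex02 b ++ csep t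

lemma foldl_str {α : Type} (g : α → String) (l : List α) (a : String) :
    l.foldl (fun acc x => acc ++ g x) a = a ++ l.foldl (fun acc x => acc ++ g x) "" := by
  induction l generalizing a with
  | nil => simp
  | cons x t ih =>
    simp only [List.foldl_cons]
    rw [ih (a ++ g x), ih ("" ++ g x)]
    simp [String.append_assoc]

lemma str_join_single (sep a : String) : PySem.Str.join sep [a] = a := by
  apply String.toList_inj.mp
  simp [PySem.Str.toList_join, PySem.Chars.join_singleton]

lemma str_join_cons (sep a b : String) (t : List String) :
    PySem.Str.join sep (a :: b :: t) = a ++ sep ++ PySem.Str.join sep (b :: t) := by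
  apply String.toList_inj.mp
  simp [PySem.Str.toList_join, PySem.Chars.join_cons_cons]

lemma chunkLines_ne_nil (d : List Int) (h : d ≠ []) : chunkLines d ≠ [] := by
  rw [chunkLines]; simp [h]

lemma aBody_cons (data : List Int) (hge : 15 ≤ data.length) :
    aBody data =
      "    " ++ PySem.Str.join ", " ((data.take 15).map pyHex02)
        ++ ((if data.length % 15 = 0 ∧ data.length / 15 = 1 then "\n};" else ",") ++ "\n")
        ++ aBody (data.drop 15) := by
  have hfd : PySem.Int.floordiv ((data.length : Nat) : Int) 15 = ((data.length / 15 : Nat) : Int) := by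
    exact_mod_cast PySem.Int.floordiv_natCast data.length 15
  have hmd : PySem.Int.mod ((data.length : Nat) : Int) 15 = ((data.length % 15 : Nat) : Int) := by
    exact_mod_cast PySem.Int.mod_natCast data.length 15
  have hld : (data.drop 15).length = data.length - 15 := by simp
  have hq1 : 1 ≤ data.length / 15 := (Nat.one_le_div_iff (by norm_num)).mpr hge
  have hdm := Nat.div_add_mod data.length 15
  have hrlt : data.length % 15 < 15 := Nat.mod_lt _ (by norm_num)
  have hdiv' : (data.length - 15) / 15 = data.length / 15 - 1 := by
    have h2 : data.length - 15 = 15 * (data.length / 15 - 1) + data.length % 15 := by omega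
    rw [h2, Nat.mul_add_div (by norm_num), Nat.div_eq_of_lt hrlt, Nat.add_zero]
  have hmod' : (data.length - 15) % 15 = data.length % 15 := by
    have h2 : data.length - 15 = 15 * (data.length / 15 - 1) + data.length % 15 := by omega
    rw [h2, Nat.mul_add_mod, Nat.mod_eq_of_lt hrlt]
  have hfd' : PySem.Int.floordiv (((data.drop 15).length : Nat) : Int) 15 = ((data.length / 15 - 1 : Nat) : Int) := by
    rw [hld, ← hdiv']; exact_mod_cast PySem.Int.floordiv_natCast (data.length - 15) 15
  have hmd' : PySem.Int.mod (((data.drop 15).length : Nat) : Int) 15 = ((data.length % 15 : Nat) : Int) := by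
    rw [hld, ← hmod']; exact_mod_cast PySem.Int.mod_natCast (data.length - 15) 15
  simp only [aBody, hfd, hmd, hfd', hmd']
  rw [PySem.List.pyRange_one_cons (show (0:Int) < ((data.length / 15 : Nat) : Int) by exact_mod_cast hq1)]
  rw [List.foldl_cons, foldl_str]
  have hs0 : PySem.List.slice data (some ((0:Int) * 15)) (some ((0:Int) * 15 + 15)) = data.take 15 := by
    norm_num [PySem.List.slice_to]
    omega
  have hiff0 : (((data.length % 15 : Nat) : Int) = 0 ∧ (0:Int) = ((data.length / 15 : Nat) : Int) - 1) ↔ (data.length % 15 = 0 ∧ data.length / 15 = 1) := by omega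
  rw [hs0, if_congr hiff0 rfl rfl]
  have ec1 : ((data.length / 15 : Nat) : Int) * 15 = ((data.length / 15 * 15 : Nat) : Int) := by push_cast; ring
  have ec2 : ((data.length / 15 - 1 : Nat) : Int) * 15 = (((data.length / 15 - 1) * 15 : Nat) : Int) := by push_cast [hq1]; ring
  have hsr : PySem.List.slice data (some (((data.length / 15 : Nat) : Int) * 15)) none
      = PySem.List.slice (data.drop 15) (some (((data.length / 15 - 1 : Nat) : Int) * 15)) none := by
    rw [ec1, ec2, PySem.List.slice_from_natCast, PySem.List.slice_from_natCast, List.drop_drop]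
    congr 1
    omega
  rw [hsr]
  have hfold : List.foldl
      (fun (acc : String) (x : Int) =>
        acc ++ ("    " ++ PySem.Str.join ", " (List.map pyHex02 (PySem.List.slice data (some (x * 15)) (some (x * 15 + 15)))) ++
          ((if ((data.length % 15 : Nat) : Int) = 0 ∧ x = ((data.length / 15 : Nat) : Int) - 1 then "\n};" else ",") ++ "\n")))
      "" (PySem.List.pyRange (0 + 1) ((data.length / 15 : Nat) : Int))
      = List.foldl
      (fun (ret : String) (i : Int) =>
        ret ++ ("    " ++ PySem.Str.join ", " (List.map pyHex02 (PySem.List.slice (List.drop 15 data) (some (i * 15)) (some (i * 15 + 15)))) ++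
          ((if ((data.length % 15 : Nat) : Int) = 0 ∧ i = ((data.length / 15 - 1 : Nat) : Int) - 1 then "\n};" else ",") ++ "\n")))
      "" (PySem.List.pyRange 0 ((data.length / 15 - 1 : Nat) : Int)) := by
    rw [PySem.List.pyRange_one, PySem.List.pyRange_one, List.foldl_map, List.foldl_map]
    have h1 : (((data.length / 15 : Nat) : Int) - (0 + 1)).toNat = data.length / 15 - 1 := by omega
    have h2 : (((data.length / 15 - 1 : Nat) : Int) - 0).toNat = data.length / 15 - 1 := by omega
    rw [h1, h2]
    apply PySem.List.foldl_congr_mem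
    intro acc k hk
    have e1 : ((0:Int) + 1 + (k : Int)) * 15 = ((15 + 15 * k : Nat) : Int) := by push_cast; ring
    have e2 : ((0:Int) + 1 + (k : Int)) * 15 + 15 = ((15 + 15 * k + 15 : Nat) : Int) := by push_cast; ring
    have e3 : ((0:Int) + (k : Int)) * 15 = ((15 * k : Nat) : Int) := by push_cast; ring
    have e4 : ((0:Int) + (k : Int)) * 15 + 15 = ((15 * k + 15 : Nat) : Int) := by push_cast; ring
    rw [e2, e1, e4, e3, PySem.List.slice_natCast, PySem.List.slice_natCast, List.drop_drop]
    have h5 : 15 + 15 * k + 15 - (15 + 15 * k) = 15 := by omega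
    have h6 : 15 * k + 15 - 15 * k = 15 := by omega
    rw [h5, h6]
    have hiff : (((data.length % 15 : Nat) : Int) = 0 ∧ (0:Int) + 1 + (k:Int) = ((data.length / 15 : Nat) : Int) - 1)
        ↔ (((data.length % 15 : Nat) : Int) = 0 ∧ (0:Int) + (k:Int) = ((data.length / 15 - 1 : Nat) : Int) - 1) := by omega
    rw [if_congr hiff rfl rfl]
  rw [hfold]
  simp [String.append_assoc]

lemma aBody_nil : aBody ([] : List Int) = "" := by decide

lemma chunkLines_nil : chunkLines ([] : List Int) = [] := by rw [chunkLines]; simp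

lemma aBody_eq_bBody : ∀ (data : List Int), aBody data = bBody data := by
  suffices H : ∀ (n : Nat) (data : List Int), data.length ≤ n → aBody data = bBody data from
    fun d => H d.length d le_rfl
  intro n
  induction n with
  | zero =>
    intro data h
    have hnil : data = [] := List.eq_nil_of_length_eq_zero (by omega)
    subst hnil
    rw [aBody_nil]; simp [bBody, chunkLines_nil]
  | succ n ih =>
    intro data h
    by_cases hnil : data = []
    · subst hnil; rw [aBody_nil]; simp [bBody, chunkLines_nil]
    · have hln : chunkLines data = ("    " ++ PySem.Str.join ", " ((data.take 15).map pyHex02)) :: chunkLines (data.drop 15) := by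
        rw [chunkLines]; simp [hnil]
      by_cases hlt : data.length < 15
      · -- a single partial line: A takes the final-line branch only, B produces one line
        have hpos : 0 < data.length := List.length_pos_of_ne_nil hnil
        have hfd : PySem.Int.floordiv ((data.length : Nat) : Int) 15 = ((data.length / 15 : Nat) : Int) := by
          exact_mod_cast PySem.Int.floordiv_natCast data.length 15
        have hmd : PySem.Int.mod ((data.length : Nat) : Int) 15 = ((data.length % 15 : Nat) : Int) := by
          exact_mod_cast PySem.Int.mod_natCast data.length 15
        have hq0 : data.length / 15 = 0 := Nat.div_eq_of_lt hlt
        have hm : data.length % 15 = data.length := Nat.mod_eq_of_lt hlt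
        have hdnil : data.drop 15 = [] := List.drop_eq_nil_of_le (by omega)
        have htk : data.take 15 = data := List.take_of_length_le (by omega)
        simp only [aBody, bBody, hln, hfd, hmd, hq0, hm, hdnil, chunkLines_nil, htk]
        rw [PySem.List.pyRange_one_eq_nil (by simp)]
        rw [if_pos (by exact_mod_cast hpos), if_neg (by simp), str_join_single]
        have hs : PySem.List.slice data (some (((0 : Nat) : Int) * 15)) none = data := by
          norm_num [PySem.List.slice_from]
        rw [hs]
        simp [String.append_assoc]
      · -- at least one whole line: peel the first chunk on both sides
        have hge : 15 ≤ data.length := Nat.not_lt.mp hlt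
        rw [aBody_cons data hge]
        simp only [bBody, hln]
        by_cases hone : data.length % 15 = 0 ∧ data.length / 15 = 1
        · -- exactly one full line and nothing more
          obtain ⟨h1, h2⟩ := hone
          have hdm := Nat.div_add_mod data.length 15
          have hlen15 : data.length = 15 := by omega
          have hdnil : data.drop 15 = [] := List.drop_eq_nil_of_le (by omega)
          rw [if_pos ⟨h1, h2⟩, hdnil, aBody_nil, chunkLines_nil]
          rw [if_neg (by simp), str_join_single]
          have hlit : ("\n};" : String) ++ "\n" = "\n};\n" := by decide
          simp only [String.append_assoc, hlit]
          simp
        · -- more data follows: the first line ends with a comma on both sides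
          have hgt : 15 < data.length := by
            rcases Nat.lt_or_ge 15 data.length with hgt | hle
            · exact hgt
            · have h15 : data.length = 15 := le_antisymm hle hge
              exact absurd (by simp [h15]) hone
          have hd'nnil : data.drop 15 ≠ [] := by
            intro hh
            have := congrArg List.length hh
            simp at this
            omega
          have hih := ih (data.drop 15) (by simp; omega)
          obtain ⟨b, t, hbt⟩ := List.exists_cons_of_ne_nil (chunkLines_ne_nil _ hd'nnil)
          rw [if_neg hone, hih]
          simp only [bBody, hbt]
          rw [if_neg (by simp), if_neg (by simp), str_join_cons]
          have hlit : ("," : String) ++ "\n" = ",\n" := by decide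
          simp only [String.append_assoc, hlit]

lemma format_hex_decomp (data : List Int) (basename : String) :
    format_hex data basename =
      "const char " ++ basename ++ "[] = {\n" ++ aBody data
        ++ ("const ssize_t " ++ basename ++ "_len = " ++ PySem.Int.toStr (data.length : Int) ++ ";\n\n") := by
  simp only [format_hex, aBody]
  rw [foldl_str]
  split_ifs with h
  · simp [String.append_assoc]
  · simp [String.append_assoc]

-- B's enumerate-fold is efB
lemma foldl_enum_eq_efB : ∀ (xs : List Int) (s : Int) (acc : String),
    (PySem.List.enumerate xs s).foldl (fun out p =>
        out ++ (if p.1 = 0 then "    " else if PySem.Int.mod p.1 15 = 0 then ",\n    " else ", ")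
            ++ pyHex02 p.2) acc = acc ++ efB s xs := by
  intro xs
  induction xs with
  | nil => intro s acc; simp [PySem.List.enumerate_nil, efB]
  | cons b t ih =>
    intro s acc
    rw [PySem.List.enumerate_cons, List.foldl_cons, ih, efB]
    simp [String.append_assoc]

-- the hex of a chunk, comma-joined, via csep
lemma csep_join (c : List Int) : ∀ (x : String),
    x ++ csep c = PySem.Str.join ", " (x :: c.map pyHex02) := by
  induction c with
  | nil => intro x; rw [csep]; simp [str_join_single]
  | cons b t ih =>
    intro x
    rw [List.map_cons, str_join_cons, csep, ← ih (pyHex02 b)]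
    simp [String.append_assoc]

-- within a chunk, every separator after the first byte is ", "
lemma efB_run (c : List Int) : ∀ (rest : List Int) (n : Nat), n % 15 ≠ 0 → n % 15 + c.length ≤ 15 →
    efB ((n : Nat) : Int) (c ++ rest) = csep c ++ efB (((n + c.length : Nat) : Nat) : Int) rest := by
  induction c with
  | nil => intro rest n _ _; simp [csep]
  | cons b t ih =>
    intro rest n hmod hle
    have hn0 : ((n : Nat) : Int) ≠ 0 := by
      intro hh
      have : n = 0 := by exact_mod_cast hh
      omega
    have hm : PySem.Int.mod ((n : Nat) : Int) 15 ≠ 0 := by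
      have := PySem.Int.mod_natCast n 15
      rw [show ((15:Nat):Int) = (15:Int) from rfl] at this
      rw [this]
      intro hh
      have : n % 15 = 0 := by exact_mod_cast hh
      omega
    rw [List.cons_append, efB, if_neg hn0, if_neg hm]
    have hcast : ((n : Nat) : Int) + 1 = (((n + 1 : Nat) : Nat) : Int) := by push_cast; ring
    simp only [List.length_cons] at hle
    by_cases ht : t = []
    · subst ht
      simp only [List.nil_append]
      rw [hcast]
      simp [csep, String.append_assoc]
    · have htpos : 1 ≤ t.length := List.length_pos_of_ne_nil ht
      have hstep : (n + 1) % 15 = n % 15 + 1 := by omega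
      have hmod' : (n + 1) % 15 ≠ 0 := by omega
      have hle' : (n + 1) % 15 + t.length ≤ 15 := by omega
      rw [hcast, ih rest (n + 1) hmod' hle', csep]
      have hfin : (n + 1 + t.length : Nat) = (n + (b :: t).length : Nat) := by simp; omega
      rw [hfin]
      simp [String.append_assoc]

-- the streaming emitter, started at a line boundary, produces the ",\n"-joined chunk lines
lemma efB_eq_chunks : ∀ (N : Nat) (rest : List Int) (n : Nat), rest.length ≤ N → rest ≠ [] → n % 15 = 0 →
    efB ((n : Nat) : Int) rest = (if n = 0 then "" else ",\n") ++ PySem.Str.join ",\n" (chunkLines rest) := by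
  intro N
  induction N with
  | zero =>
    intro rest n h hne _
    exact absurd (List.eq_nil_of_length_eq_zero (by omega)) hne
  | succ N ih =>
    intro rest n hlen hne hmod
    obtain ⟨b, t, rfl⟩ := List.exists_cons_of_ne_nil hne
    have hm0 : PySem.Int.mod ((n : Nat) : Int) 15 = 0 := by
      have := PySem.Int.mod_natCast n 15
      rw [show ((15:Nat):Int) = (15:Int) from rfl] at this
      rw [this]
      exact_mod_cast hmod
    have hsep : (if ((n : Nat) : Int) = 0 then "    " else if PySem.Int.mod ((n : Nat) : Int) 15 = 0 then ",\n    " else ", ")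
        = (if n = 0 then "" else ",\n") ++ "    " := by
      by_cases h0 : n = 0
      · subst h0; simp
      · rw [if_neg (show ¬((n : Nat) : Int) = 0 by exact_mod_cast h0), if_pos hm0, if_neg h0]
        decide
    have hsplit : t = t.take 14 ++ t.drop 14 := (List.take_append_drop 14 t).symm
    have hcast1 : ((n : Nat) : Int) + 1 = (((n + 1 : Nat) : Nat) : Int) := by push_cast; ring
    have hmod1 : (n + 1) % 15 ≠ 0 := by omega
    have hle1 : (n + 1) % 15 + (t.take 14).length ≤ 15 := by
      have : (t.take 14).length ≤ 14 := by simp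
      omega
    rw [efB, hsep, hcast1]
    conv_lhs => rw [hsplit]
    rw [efB_run (t.take 14) (t.drop 14) (n + 1) hmod1 hle1]
    have hln : chunkLines (b :: t) = ("    " ++ PySem.Str.join ", " (((b :: t).take 15).map pyHex02)) :: chunkLines ((b :: t).drop 15) := by
      rw [chunkLines]; simp
    have htake : (b :: t).take 15 = b :: t.take 14 := by rfl
    have hdrop : (b :: t).drop 15 = t.drop 14 := by rfl
    by_cases hrest : t.drop 14 = []
    · -- last chunk: nothing follows
      have hd15 : chunkLines ((b :: t).drop 15) = [] := by rw [hdrop, hrest, chunkLines_nil]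
      rw [hrest, efB]
      rw [hln, hd15, htake, str_join_single, List.map_cons, ← csep_join (t.take 14) (pyHex02 b)]
      simp [String.append_assoc]
    · -- further chunks: t has ≥ 15 elements, next index is the next line boundary
      have htlen : 14 < t.length := by
        by_contra hh
        exact hrest (List.drop_eq_nil_of_le (by omega))
      have htk14 : (t.take 14).length = 14 := by simp; omega
      have hidx : (n + 1 + (t.take 14).length : Nat) = n + 15 := by rw [htk14]
      have hih := ih (t.drop 14) (n + 15)
        (by have h' : t.length + 1 ≤ N + 1 := by simpa using hlen
            simp only [List.length_drop]; omega) hrest (by omega)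
      rw [hidx, hih, if_neg (show ¬(n + 15 = 0) by omega)]
      have hcl := chunkLines_ne_nil (t.drop 14) hrest
      obtain ⟨x, l, hxl⟩ := List.exists_cons_of_ne_nil hcl
      rw [hln, htake, hdrop, hxl, str_join_cons, List.map_cons, ← csep_join (t.take 14) (pyHex02 b)]
      simp only [String.append_assoc]

lemma format_hex_alt_decomp (data : List Int) (basename : String) :
    format_hex_alt data basename =
      "const char " ++ basename ++ "[] = {\n" ++ bBody data
        ++ ("const ssize_t " ++ basename ++ "_len = " ++ PySem.Int.toStr (data.length : Int) ++ ";\n\n") := by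
  simp only [format_hex_alt]
  rw [foldl_enum_eq_efB]
  by_cases hnil : data = []
  · subst hnil
    simp [efB, bBody, chunkLines_nil]
  · have h0 : ((0 : Int)) = (((0 : Nat) : Nat) : Int) := rfl
    rw [if_pos hnil, h0, efB_eq_chunks data.length data 0 le_rfl hnil (by omega), if_pos rfl]
    have hb : bBody data = PySem.Str.join ",\n" (chunkLines data) ++ "\n};\n" := by
      rw [bBody, if_neg (chunkLines_ne_nil data hnil)]
    rw [hb]
    simp [String.append_assoc]

-- ===== VERDICT (by name: the statement is the Claim_ definition above) =====
theorem format_hex_spec : Claim_equal_format_hex := by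
  intro data basename _
  unfold Spec_format_hex
  rw [format_hex_decomp, aBody_eq_bBody, format_hex_alt_decomp]
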